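-- pv_equiv track=rewrite | github.com/darinchau/classical_music | src/generate/counterpoint.py | _is_repeated_motifs
-- ===== SOURCE A (Python) =====
-- def _is_repeated_motifs(cf_shell: list[int]) -> bool:
--     paired_notes: list[list[int]] = []
--     for i in range(len(cf_shell)-1):
--         if cf_shell[i] == cf_shell[i+1]:
--             return True
--         if cf_shell[i] == cf_shell[0] and i != 0:
--             return True
--         paired_notes.append([cf_shell[i], cf_shell[i+1]])
--     for pairs in paired_notes:
--         if paired_notes.count(pairs) > 1:
--             return True
--     return False
-- ===== SOURCE B (Python) =====
-- def _is_repeated_motifs(cf_shell: list[int]) -> bool: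
--     if not cf_shell:
--         return False
--     first = cf_shell[0]
--     pairs: list[tuple[int, int]] = []
--     prev = first
--     for cur in cf_shell[1:]:
--         if prev == cur:
--             return True
--         if pairs and prev == first:
--             return True
--         pairs.append((prev, cur))
--         prev = cur
--     pairs.sort()
--     return any(a == b for a, b in zip(pairs, pairs[1:]))
-- ===== Notes on version B (the rewrite author's own statement) =====
-- stated objective: alternative
-- what changed: Replaces A's index-subscripting loop plus quadratic list.count duplicate scan by an element-wise walk with a prev accumulator that builds tuple pairs, followed by sort-then-scan: sort the pairs lexicographically and return whether any two consecutive sorted pairs are equal.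
import Mathlib
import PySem

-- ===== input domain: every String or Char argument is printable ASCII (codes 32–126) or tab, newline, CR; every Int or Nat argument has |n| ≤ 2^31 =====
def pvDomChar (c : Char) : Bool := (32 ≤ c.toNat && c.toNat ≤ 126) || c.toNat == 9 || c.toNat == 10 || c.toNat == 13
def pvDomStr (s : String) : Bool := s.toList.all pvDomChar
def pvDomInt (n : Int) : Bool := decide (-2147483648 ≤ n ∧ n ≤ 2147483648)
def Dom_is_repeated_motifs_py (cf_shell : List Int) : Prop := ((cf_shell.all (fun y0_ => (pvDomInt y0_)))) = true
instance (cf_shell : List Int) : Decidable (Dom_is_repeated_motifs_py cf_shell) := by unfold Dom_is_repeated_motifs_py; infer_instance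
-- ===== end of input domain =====

-- B replaces A's index-subscripting loop + quadratic count scan by an element-wise walk with a
-- prev accumulator building tuple pairs, then lexicographic sort + one adjacent-equality scan.

-- ===== PORT A =====
-- first loop: over the index list, accumulating paired_notes; 'none' = early 'return True'
def arLoop1 (cf : List Int) : List Int → List (List Int) → Option (List (List Int))
  | [], acc => some acc
  | i :: rest, acc =>
      if PySem.List.pyGetD cf i 0 = PySem.List.pyGetD cf (i + 1) 0 then none
      else if PySem.List.pyGetD cf i 0 = PySem.List.pyGetD cf 0 0 ∧ i ≠ 0 then none
      else arLoop1 cf rest (acc ++ [[PySem.List.pyGetD cf i 0, PySem.List.pyGetD cf (i + 1) 0]])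

-- second loop: for pairs in paired_notes: if paired_notes.count(pairs) > 1: return True
def arLoop2 (all : List (List Int)) : List (List Int) → Bool
  | [] => false
  | p :: rest => if 1 < PySem.List.count all p then true else arLoop2 all rest

def is_repeated_motifs_py (cf_shell : List Int) : Bool :=
  match arLoop1 cf_shell (PySem.List.pyRange 0 ((cf_shell.length : Int) - 1) 1) [] with
  | none => true
  | some paired_notes => arLoop2 paired_notes paired_notes

-- ===== PORT B =====
-- the 'for cur in cf_shell[1:]' loop of Source B with state (prev, pairs); 'none' = early 'return True'
def bWalk (first : Int) : Int → List Int → List (Int × Int) → Option (List (Int × Int))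
  | _, [], pairs => some pairs
  | prev, cur :: rest, pairs =>
      if prev = cur then none
      else if pairs ≠ [] ∧ prev = first then none
      else bWalk first cur rest (pairs ++ [(prev, cur)])

def is_repeated_motifs_py_alt (cf_shell : List Int) : Bool :=
  match cf_shell with
  | [] => false
  | first :: rest =>
      match bWalk first first rest [] with
      | none => true
      | some pairs =>
          let s := PySem.List.sorted2 pairs Prod.fst Prod.snd   -- pairs.sort(): lexicographic
          (s.zip (PySem.List.slice s (some 1) none)).any fun p => p.1 == p.2

-- ===== PRECONDITION & SPEC =====
def Spec_is_repeated_motifs_py (cf_shell : List Int) (out : Bool) : Prop := out = is_repeated_motifs_py_alt cf_shell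
instance (cf_shell : List Int) (out : Bool) : Decidable (Spec_is_repeated_motifs_py cf_shell out) := by unfold Spec_is_repeated_motifs_py; infer_instance

-- ===== CLAIM (what is proved, stated in full; the proofs are below) =====
def Claim_equal_is_repeated_motifs_py : Prop := ∀ (cf_shell : List Int), Dom_is_repeated_motifs_py cf_shell → Spec_is_repeated_motifs_py cf_shell (is_repeated_motifs_py cf_shell)

-- ===== LEMMAS AND PROOFS =====

-- adjacent pairs of a list (what both programs build; A as [x,y] lists, B as (x,y) tuples)
def adjPairs (xs : List Int) : List (Int × Int) := xs.zip xs.tail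

def toL (p : Int × Int) : List Int := [p.1, p.2]

-- the strict lexicographic comparison sorted2 uses
def lexB (a b : Int × Int) : Bool :=
  decide (a.1 < b.1) || (!decide (b.1 < a.1) && decide (a.2 < b.2))

lemma lexB_true_iff (a b : Int × Int) :
    lexB a b = true ↔ a.1 < b.1 ∨ (a.1 = b.1 ∧ a.2 < b.2) := by
  simp [lexB]; omega

lemma lexB_false_iff (a b : Int × Int) :
    lexB a b = false ↔ b.1 < a.1 ∨ (b.1 = a.1 ∧ b.2 ≤ a.2) := by
  simp [lexB]; omega

lemma sorted2_eq_foldl (l : List (Int × Int)) :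
    PySem.List.sorted2 l Prod.fst Prod.snd = l.foldl (fun acc x => PySem.List.insertBy lexB x acc) [] := rfl

-- insertBy with lexB preserves sortedness (Pairwise "not strictly greater")
lemma insertBy_pairwise (x : Int × Int) :
    ∀ ys : List (Int × Int), ys.Pairwise (fun a b => lexB b a = false) →
      (PySem.List.insertBy lexB x ys).Pairwise (fun a b => lexB b a = false) := by
  intro ys
  induction ys with
  | nil => intro _; simp [PySem.List.insertBy]
  | cons y ys ih =>
    intro h
    rw [List.pairwise_cons] at h
    obtain ⟨hy, hys⟩ := h
    by_cases hb : lexB x y = true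
    · simp only [PySem.List.insertBy, hb, if_true]
      refine List.pairwise_cons.mpr ⟨?_, List.pairwise_cons.mpr ⟨hy, hys⟩⟩
      intro z hz
      rcases List.mem_cons.mp hz with rfl | hz
      · rw [lexB_false_iff]; rw [lexB_true_iff] at hb; omega
      · have h1 := hy z hz
        rw [lexB_false_iff] at h1 ⊢
        rw [lexB_true_iff] at hb
        omega
    · have hb' : lexB x y = false := by revert hb; cases lexB x y <;> simp
      simp only [PySem.List.insertBy, hb]
      rw [if_neg (by simp)]
      refine List.pairwise_cons.mpr ⟨?_, ih hys⟩
      intro z hz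
      rcases (PySem.List.mem_insertBy lexB x z ys).mp hz with rfl | hz
      · exact hb'
      · exact hy z hz

lemma sorted2_sortedness (l : List (Int × Int)) :
    (PySem.List.sorted2 l Prod.fst Prod.snd).Pairwise (fun a b => lexB b a = false) := by
  rw [sorted2_eq_foldl]
  suffices h : ∀ (l : List (Int × Int)) (acc : List (Int × Int)),
      acc.Pairwise (fun a b => lexB b a = false) →
      (l.foldl (fun acc x => PySem.List.insertBy lexB x acc) acc).Pairwise (fun a b => lexB b a = false) by
    exact h l [] (by simp)
  intro l
  induction l with
  | nil => intro acc h; simpa using h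
  | cons x l ih => intro acc h; exact ih _ (insertBy_pairwise x acc h)

-- the lexicographic strict order on pairs, as a Prop
def lexLt (a b : Int × Int) : Prop := a.1 < b.1 ∨ (a.1 = b.1 ∧ a.2 < b.2)

-- the adjacent scan is false iff no two consecutive elements are equal
lemma zipAny_eq_false_iff_chain :
    ∀ m : List (Int × Int), ((m.zip m.tail).any fun p => p.1 == p.2) = false ↔ m.IsChain (· ≠ ·) := by
  intro m
  induction m with
  | nil => simp
  | cons a m ih =>
    cases m with
    | nil => simp
    | cons b m =>
      simp only [List.tail_cons, List.zip_cons_cons, List.any_cons, Bool.or_eq_false_iff,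
        beq_eq_false_iff_ne, List.isChain_cons_cons] at ih ⊢
      exact and_congr Iff.rfl ih

-- point-wise conjunction of two chains
lemma isChain_and {α : Type} (R S : α → α → Prop) :
    ∀ l : List α, l.IsChain R → l.IsChain S → l.IsChain (fun a b => R a b ∧ S a b) := by
  intro l
  induction l with
  | nil => intro _ _; simp
  | cons a m ih =>
    cases m with
    | nil => intro _ _; simp
    | cons b m =>
      intro hR hS
      rw [List.isChain_cons_cons] at hR hS ⊢
      exact ⟨⟨hR.1, hS.1⟩, ih hR.2 hS.2⟩

-- a lexLt-chain is lexLt-pairwise (transitivity, by hand)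
lemma pairwise_of_isChain_lexLt :
    ∀ m : List (Int × Int), m.IsChain lexLt → m.Pairwise lexLt := by
  intro m
  induction m with
  | nil => intro _; simp
  | cons a m ih =>
    cases m with
    | nil => intro _; simp
    | cons b m =>
      intro h
      rw [List.isChain_cons_cons] at h
      have hpw : (b :: m).Pairwise lexLt := ih h.2
      refine List.pairwise_cons.mpr ⟨?_, hpw⟩
      intro z hz
      rcases List.mem_cons.mp hz with rfl | hz
      · exact h.1
      · have hbz := (List.pairwise_cons.mp hpw).1 z hz
        rcases h.1 with h1 | ⟨h1, h2⟩ <;> rcases hbz with h3 | ⟨h3, h4⟩ <;>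
          [left; left; left; right] <;> unfold lexLt at * <;> omega

-- on a sorted pair list, an equal adjacent pair exists iff the list has a duplicate
lemma adjdup_sorted2 (l : List (Int × Int)) :
    (((PySem.List.sorted2 l Prod.fst Prod.snd).zip (PySem.List.sorted2 l Prod.fst Prod.snd).tail).any
       fun p => p.1 == p.2) = !decide l.Nodup := by
  have hperm : (PySem.List.sorted2 l Prod.fst Prod.snd).Perm l :=
    PySem.List.sorted2_perm l Prod.fst Prod.snd false
  have hs := sorted2_sortedness l
  set m := PySem.List.sorted2 l Prod.fst Prod.snd with hm
  have hnd : l.Nodup ↔ m.Nodup := (hperm.nodup_iff).symm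
  by_cases h : l.Nodup
  · have hmnd : m.Nodup := hnd.mp h
    have : ((m.zip m.tail).any fun p => p.1 == p.2) = false := by
      rw [zipAny_eq_false_iff_chain]
      exact List.Pairwise.isChain hmnd
    simp [this, h]
  · have hmnd : ¬ m.Nodup := fun hc => h (hnd.mpr hc)
    have hkey : ¬ ((m.zip m.tail).any fun p => p.1 == p.2) = false := by
      intro hc
      apply hmnd
      have hchain : m.IsChain (· ≠ ·) := (zipAny_eq_false_iff_chain m).mp hc
      have hsc : m.IsChain (fun a b => lexB b a = false) := List.Pairwise.isChain hs
      have hlt : m.IsChain lexLt := by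
        refine (isChain_and _ _ m hchain hsc).imp ?_
        rintro a b ⟨hne, hle⟩
        rw [lexB_false_iff] at hle
        rcases hle with h1 | ⟨h1, h2⟩
        · exact Or.inl h1
        · rcases lt_or_eq_of_le h2 with h3 | h3
          · exact Or.inr ⟨h1, h3⟩
          · exact absurd (Prod.ext h1 h3) hne
      have hpw := pairwise_of_isChain_lexLt m hlt
      exact hpw.imp (by rintro a b (h1 | ⟨h1, h2⟩) <;> intro hc <;> subst hc <;> unfold lexLt at * <;> omega)
    have hany : ((m.zip m.tail).any fun p => p.1 == p.2) = true := by
      revert hkey; cases ((m.zip m.tail).any fun p => p.1 == p.2) <;> simp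
    simp [hany, h]

lemma arLoop2_eq_any (all : List (List Int)) :
    ∀ l : List (List Int), arLoop2 all l = l.any fun p => decide (1 < List.count p all) := by
  intro l
  induction l with
  | nil => rfl
  | cons p rest ih =>
    by_cases h : 1 < List.count p all <;>
      simp [arLoop2, PySem.List.count_eq, h, ih]

lemma any_count_eq_not_nodup (l : List (List Int)) :
    (l.any fun p => decide (1 < List.count p l)) = !decide l.Nodup := by
  by_cases h : l.Nodup
  · simp [h, List.any_eq_true]
    intro p _
    have := List.nodup_iff_count_le_one.mp h p
    omega
  · simp [h, List.any_eq_true]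
    rw [List.nodup_iff_count_le_one] at h
    push_neg at h
    obtain ⟨p, hp⟩ := h
    exact ⟨p, List.count_pos_iff.mp (by omega), by omega⟩

lemma nodup_map_toL (l : List (Int × Int)) : (l.map toL).Nodup ↔ l.Nodup := by
  apply List.nodup_map_iff
  intro a b hab
  simp [toL] at hab
  exact Prod.ext_iff.mpr hab

lemma adjPairs_nil_of_short (xs : List Int) (h : xs.length ≤ 1) : adjPairs xs = [] := by
  cases xs with
  | nil => rfl
  | cons a t =>
    cases t with
    | nil => rfl
    | cons b u => simp at h

-- characterization of A's first loop from index j ≥ 1 on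
lemma arLoop1_char (cf : List Int) :
    ∀ (k j : Nat) (acc : List (List Int)), 1 ≤ j → (j : Int) + k = (cf.length : Int) - 1 →
    arLoop1 cf (PySem.List.pyRange (j : Int) ((cf.length : Int) - 1) 1) acc =
      if ((adjPairs (cf.drop j)).any fun p => p.1 == p.2 || p.1 == cf.getD 0 0) then none
      else some (acc ++ (adjPairs (cf.drop j)).map toL) := by
  intro k
  induction k with
  | zero =>
    intro j acc hj hk
    have hrange : PySem.List.pyRange (j : Int) ((cf.length : Int) - 1) 1 = [] :=
      PySem.List.pyRange_one_eq_nil (by omega)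
    have hdrop : (cf.drop j).length = 1 := by
      rw [List.length_drop]; omega
    have : adjPairs (cf.drop j) = [] := adjPairs_nil_of_short _ (by omega)
    simp [hrange, arLoop1, this]
  | succ k ih =>
    intro j acc hj hk
    have hjlt : (j : Int) < (cf.length : Int) - 1 := by omega
    have hj1 : j + 1 < cf.length := by omega
    have hjl : j < cf.length := by omega
    rw [PySem.List.pyRange_one_cons hjlt]
    have hget : PySem.List.pyGetD cf (j : Int) 0 = cf[j] := by
      rw [PySem.List.pyGetD_natCast]; exact List.getD_eq_getElem cf 0 hjl
    have hget1 : PySem.List.pyGetD cf ((j : Int) + 1) 0 = cf[j + 1] := by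
      have : (j : Int) + 1 = ((j + 1 : Nat) : Int) := by push_cast; ring
      rw [this, PySem.List.pyGetD_natCast]; exact List.getD_eq_getElem cf 0 hj1
    have hget0 : PySem.List.pyGetD cf 0 0 = cf.getD 0 0 := by
      simpa using PySem.List.pyGetD_natCast cf 0 0
    have hdrop : cf.drop j = cf[j] :: cf.drop (j + 1) := List.drop_eq_getElem_cons hjl
    have hdrop1 : cf.drop (j + 1) = cf[j + 1] :: cf.drop (j + 2) := List.drop_eq_getElem_cons hj1
    have hadj : adjPairs (cf.drop j) = (cf[j], cf[j + 1]) :: adjPairs (cf.drop (j + 1)) := by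
      rw [adjPairs, hdrop, hdrop1]; rfl
    simp only [arLoop1, hget, hget1, hget0]
    have hjne : (j : Int) ≠ 0 := by omega
    by_cases h1 : cf[j] = cf[j + 1]
    · rw [if_pos h1, hadj]
      simp [List.any_cons, h1]
    · rw [if_neg h1]
      by_cases h2 : cf[j] = cf.getD 0 0
      · rw [if_pos ⟨h2, hjne⟩, hadj]
        simp [List.any_cons, h2]
      · rw [if_neg (fun hc => h2 hc.1)]
        have hc : ((j : Int) + 1) = ((j + 1 : Nat) : Int) := by push_cast; ring
        rw [hc, ih (j + 1) (acc ++ [[cf[j], cf[j + 1]]]) (by omega) (by push_cast; omega)]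
        rw [hadj]
        have e1 : (cf[j] == cf[j + 1]) = false := by rw [beq_eq_false_iff_ne]; exact h1
        have e2 : (cf[j] == cf.getD 0 0) = false := by rw [beq_eq_false_iff_ne]; exact h2
        simp only [List.any_cons, e1, e2, Bool.false_or]
        simp [toL]

-- characterization of B's walk (after the first step, i.e. with a nonempty accumulator)
lemma bWalk_char (first : Int) :
    ∀ (rest : List Int) (prev : Int) (acc : List (Int × Int)), acc ≠ [] →
    bWalk first prev rest acc =
      if ((adjPairs (prev :: rest)).any fun p => p.1 == p.2 || p.1 == first) then none
      else some (acc ++ adjPairs (prev :: rest)) := by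
  intro rest
  induction rest with
  | nil =>
    intro prev acc hacc
    simp [bWalk, adjPairs]
  | cons cur rest ih =>
    intro prev acc hacc
    have hadj : adjPairs (prev :: cur :: rest) = (prev, cur) :: adjPairs (cur :: rest) := rfl
    simp only [bWalk, hadj]
    by_cases h1 : prev = cur
    · rw [if_pos h1]
      simp [List.any_cons, h1]
    · rw [if_neg h1]
      by_cases h2 : prev = first
      · rw [if_pos ⟨hacc, h2⟩]
        simp [List.any_cons, h2]
      · rw [if_neg (fun hc => h2 hc.2)]
        rw [ih cur (acc ++ [(prev, cur)]) (by simp)]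
        have e1 : (prev == cur) = false := by rw [beq_eq_false_iff_ne]; exact h1
        have e2 : (prev == first) = false := by rw [beq_eq_false_iff_ne]; exact h2
        simp only [List.any_cons, e1, e2, Bool.false_or]
        simp

lemma arLoop2_map_toL (l : List (Int × Int)) :
    arLoop2 (l.map toL) (l.map toL) = !decide l.Nodup := by
  rw [arLoop2_eq_any, any_count_eq_not_nodup]
  simp [nodup_map_toL]

-- ===== VERDICT (by name: the statement is the Claim_ definition above) =====
theorem is_repeated_motifs_py_spec : Claim_equal_is_repeated_motifs_py := by
  intro cf _
  unfold Spec_is_repeated_motifs_py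
  cases cf with
  | nil => decide
  | cons c0 t =>
    cases t with
    | nil =>
      have hr : PySem.List.pyRange 0 ((([c0] : List Int).length : Int) - 1) 1 = [] :=
        PySem.List.pyRange_one_eq_nil (by simp)
      unfold is_repeated_motifs_py
      rw [hr]
      unfold is_repeated_motifs_py_alt
      simp [bWalk, arLoop1, arLoop2, PySem.List.sorted2]
    | cons c1 rest =>
      have hl : (c0 :: c1 :: rest).length = rest.length + 2 := by simp
      have hpos : (0 : Int) < ((c0 :: c1 :: rest).length : Int) - 1 := by
        rw [hl]; push_cast; omega
      unfold is_repeated_motifs_py is_repeated_motifs_py_alt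
      rw [PySem.List.pyRange_one_cons hpos]
      have g1 : PySem.List.pyGetD (c0 :: c1 :: rest) (0 + 1) 0 = c1 := by
        have h1 : ((0 : Int) + 1) = ((1 : Nat) : Int) := by norm_num
        rw [h1, PySem.List.pyGetD_natCast]
        rfl
      simp only [arLoop1, bWalk, PySem.List.pyGetD_zero_cons, g1]
      by_cases h01 : c0 = c1
      · rw [if_pos h01, if_pos h01]
      · rw [if_neg h01, if_neg h01, if_neg (by simp)]
        rw [if_neg (by simp : ¬ (([] : List (Int × Int)) ≠ [] ∧ True))]
        rw [show (0 : Int) + 1 = ((1 : Nat) : Int) by norm_num]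
        rw [arLoop1_char (c0 :: c1 :: rest) rest.length 1 _ (by omega) (by rw [hl]; push_cast; omega)]
        rw [bWalk_char c0 rest c1 ([] ++ [(c0, c1)]) (by simp)]
        simp only [List.drop_succ_cons, List.drop_zero, List.getD_cons_zero]
        have hA : adjPairs (c0 :: c1 :: rest) = (c0, c1) :: adjPairs (c1 :: rest) := rfl
        cases hcond : ((adjPairs (c1 :: rest)).any fun p => p.1 == p.2 || p.1 == c0) with
        | true => simp
        | false =>
          rw [if_neg (by simp), if_neg (by simp)]
          have hmapA : ([] ++ [[c0, c1]] ++ List.map toL (adjPairs (c1 :: rest))) =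
              List.map toL (adjPairs (c0 :: c1 :: rest)) := rfl
          have hmapB : ([] ++ [(c0, c1)] ++ adjPairs (c1 :: rest)) = adjPairs (c0 :: c1 :: rest) := rfl
          rw [hmapA, hmapB]
          show arLoop2 (List.map toL (adjPairs (c0 :: c1 :: rest))) (List.map toL (adjPairs (c0 :: c1 :: rest))) =
            (((PySem.List.sorted2 (adjPairs (c0 :: c1 :: rest)) Prod.fst Prod.snd).zip
              (PySem.List.slice (PySem.List.sorted2 (adjPairs (c0 :: c1 :: rest)) Prod.fst Prod.snd) (some 1) none)).any
              fun p => p.1 == p.2)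
          rw [arLoop2_map_toL, PySem.List.slice_from_one, adjdup_sorted2]
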